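-- pv_equiv track=rewrite | github.com/PizzasBear/rl-ext | sac/utils.py | find23
-- ===== SOURCE A (Python) =====
-- from itertools import count
--
-- def find23(n: int) -> int:
--     if n < 10:
--         return n & ~1
--     m = 1
--     for b in count(0):
--         x = 3 ** b
--         if n < x:
--             if x-n < abs(n-m):
--                 m = x
--             break
--         for a in count(0):
--             y = x << a
--             if abs(n-y) < abs(n-m):
--                 m = y
--             if n < y:
--                 break
--     return m
-- ===== SOURCE B (Python) =====
-- def find23(n: int) -> int:
--     if n < 10:
--         return n & ~1
--     m = 1
--     x = 1
--     while x <= n: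
--         q = n // x
--         p = 1 << (q.bit_length() - 1)  # largest power of two <= q
--         c1 = x * p
--         if abs(n - c1) < abs(n - m):
--             m = c1
--         c2 = c1 * 2
--         if abs(n - c2) < abs(n - m):
--             m = c2
--         x *= 3
--     if x - n < abs(n - m):
--         m = x
--     return m
-- ===== Notes on version B (the rewrite author's own statement) =====
-- stated objective: alternative
-- what changed: The inner linear scan over successive powers of two multiplied by the current power of three is removed: for each power of three the two nearest power-of-two multiples of it are computed directly via bit_length of the floor quotient, and only those two candidates are tested against the running best.
import Mathlib
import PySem

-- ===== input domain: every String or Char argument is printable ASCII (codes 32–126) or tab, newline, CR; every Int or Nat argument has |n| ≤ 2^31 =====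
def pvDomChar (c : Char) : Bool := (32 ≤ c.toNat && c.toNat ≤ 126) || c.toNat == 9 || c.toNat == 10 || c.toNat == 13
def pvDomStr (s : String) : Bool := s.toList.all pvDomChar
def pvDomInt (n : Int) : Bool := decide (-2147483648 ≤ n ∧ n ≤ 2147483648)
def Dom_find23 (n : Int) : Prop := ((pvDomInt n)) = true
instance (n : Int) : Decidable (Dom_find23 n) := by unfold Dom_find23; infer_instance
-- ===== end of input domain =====

-- B replaces A's inner linear scan over powers of two with a direct bit_length computation
-- of the two nearest power-of-two multiples of 3^b (objective: faster inner step).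

-- ===== PORT A =====
-- inner 'for a in count(0)' loop of A; fuel 64 never runs out for |n| ≤ 2^31 (x ≥ 1).
def find23Inner (n x : Int) : Nat → Nat → Int → Int
  | 0, _, m => m
  | f + 1, a, m =>
    let y := x * 2 ^ a          -- x << a (x = 3^b ≥ 1)
    let m' := if |n - y| < |n - m| then y else m
    if n < y then m' else find23Inner n x f (a + 1) m'

-- outer 'for b in count(0)' loop of A; fuel 64 never runs out for |n| ≤ 2^31.
def find23Loop (n : Int) : Nat → Nat → Int → Int
  | 0, _, m => m
  | f + 1, b, m =>
    let x : Int := 3 ^ b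
    if n < x then (if x - n < |n - m| then x else m)
    else find23Loop n f (b + 1) (find23Inner n x 64 0 m)

def find23 (n : Int) : Int :=
  if n < 10 then Int.land n (-2)     -- n & ~1 (two's complement, Python-exact)
  else find23Loop n 64 0 1

-- ===== PORT B =====
-- 'while x <= n' loop of Source B with state x; after the loop the final candidate x is tested.
-- fuel 64 never runs out for |n| ≤ 2^31.
def find23AltLoop (n : Int) : Nat → Int → Int → Int
  | 0, _, m => m
  | f + 1, x, m =>
    if x ≤ n then
      let q := PySem.Int.floordiv n x               -- n // x
      let p : Int := 2 ^ (PySem.Int.bitLength q - 1) -- 1 << (q.bit_length() - 1)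
      let c1 := x * p
      let m1 := if |n - c1| < |n - m| then c1 else m
      let c2 := c1 * 2
      let m2 := if |n - c2| < |n - m1| then c2 else m1
      find23AltLoop n f (x * 3) m2
    else (if x - n < |n - m| then x else m)

def find23_alt (n : Int) : Int :=
  if n < 10 then Int.land n (-2)
  else find23AltLoop n 64 1 1

-- ===== PRECONDITION & SPEC =====
def Spec_find23 (n : Int) (out : Int) : Prop := out = find23_alt n
instance (n : Int) (out : Int) : Decidable (Spec_find23 n out) := by unfold Spec_find23; infer_instance

-- ===== CLAIM (what is proved, stated in full; the proofs are below) =====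
def Claim_equal_find23 : Prop := ∀ (n : Int), Dom_find23 n → Spec_find23 n (find23 n)

-- ===== LEMMAS AND PROOFS =====

-- the update step both programs use
def pvUpd (n m c : Int) : Int := if |n - c| < |n - m| then c else m

-- updating with a strictly worse candidate first does not change the result
lemma pvUpd_collapse (n m c1 c2 : Int) (h : |n - c2| < |n - c1|) :
    pvUpd n (pvUpd n m c1) c2 = pvUpd n m c2 := by
  unfold pvUpd; split_ifs <;> omega

-- A's inner scan equals the two-candidate update, for a ≤ L where x*2^L ≤ n < x*2^(L+1)
lemma find23Inner_eq (n x : Int) (L : Nat) (hx : 1 ≤ x)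
    (hL1 : x * 2 ^ L ≤ n) (hL2 : n < x * 2 ^ (L + 1)) :
    ∀ (f a : Nat) (m : Int), a ≤ L → L + 1 < a + f →
      find23Inner n x f a m = pvUpd n (pvUpd n m (x * 2 ^ L)) (x * 2 ^ (L + 1)) := by
  intro f
  induction f with
  | zero => intro a m haL hf; omega
  | succ f ih =>
    intro a m haL hf
    have hyle : x * 2 ^ a ≤ n := by
      calc x * 2 ^ a ≤ x * 2 ^ L := by
            apply mul_le_mul_of_nonneg_left (by exact pow_le_pow_right₀ (by norm_num) haL) (by omega)
        _ ≤ n := hL1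
    have hny : ¬ n < x * 2 ^ a := not_lt.mpr hyle
    rcases eq_or_lt_of_le haL with hEq | hlt
    · -- a = L : one more step sees x*2^(L+1) > n and stops
      subst hEq
      have hf1 : 1 ≤ f := by omega
      obtain ⟨f', rfl⟩ : ∃ f', f = f' + 1 := ⟨f - 1, by omega⟩
      simp only [find23Inner, hny, if_false, hL2, if_true]
      rfl
    · -- a < L : recurse, then drop the strictly worse candidate x*2^a
      have hstep : find23Inner n x (f + 1) a m = find23Inner n x f (a + 1) (pvUpd n m (x * 2 ^ a)) := by
        simp only [find23Inner, hny, if_false]; rfl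
      rw [hstep, ih (a + 1) _ (by omega) (by omega)]
      have hlt' : x * 2 ^ a < x * 2 ^ L := by
        apply mul_lt_mul_of_pos_left _ (by omega)
        exact pow_lt_pow_right₀ (by norm_num) hlt
      have habs : |n - x * 2 ^ L| < |n - x * 2 ^ a| := by
        rw [abs_of_nonneg (by omega), abs_of_nonneg (by omega)]; omega
      rw [pvUpd_collapse n m _ _ habs]

-- the two exact-bracket facts for L = bitLength (n // x) - 1, when 1 ≤ x ≤ n
lemma pvBracket (n x : Int) (hx : 1 ≤ x) (hxn : x ≤ n) :
    x * 2 ^ (PySem.Int.bitLength (PySem.Int.floordiv n x) - 1) ≤ n ∧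
    n < x * 2 ^ ((PySem.Int.bitLength (PySem.Int.floordiv n x) - 1) + 1) := by
  set q := PySem.Int.floordiv n x with hq
  have hx0 : (0:Int) < x := by omega
  have hqe : q = n / x := by rw [hq]; exact PySem.Int.floordiv_eq_ediv_of_pos hx0
  have hq1 : 1 ≤ q := by
    rw [hqe]; exact (Int.le_ediv_iff_mul_le hx0).mpr (by simpa using hxn)
  have hqn : q.natAbs = q.toNat := by omega
  have hqne : q ≠ 0 := by omega
  have hbl1 : 1 ≤ PySem.Int.bitLength q := by
    by_contra h
    have h0 : PySem.Int.bitLength q = 0 := by omega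
    have := PySem.Int.lt_two_pow_bitLength q
    rw [h0] at this; simp at this; omega
  obtain ⟨L, hLdef⟩ : ∃ L, PySem.Int.bitLength q = L + 1 := ⟨PySem.Int.bitLength q - 1, by omega⟩
  have hlow : (2:Int) ^ L ≤ q := by
    have := PySem.Int.two_pow_bitLength_le q hqne
    rw [hLdef] at this; simp at this
    have : (2:Int) ^ L ≤ (q.natAbs : Int) := by exact_mod_cast this
    omega
  have hhigh : q < (2:Int) ^ (L + 1) := by
    have := PySem.Int.lt_two_pow_bitLength q
    rw [hLdef] at this
    have : (q.natAbs : Int) < (2:Int) ^ (L + 1) := by exact_mod_cast this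
    omega
  rw [hLdef]
  simp only [Nat.add_sub_cancel]
  constructor
  · calc x * 2 ^ L ≤ x * q := by nlinarith
      _ ≤ n := by
        have hd : n / x * x ≤ n := Int.ediv_mul_le n (by omega)
        rw [hqe]; nlinarith
  · have hn_lt : n < (q + 1) * x := by
      rw [hqe]; exact Int.lt_ediv_add_one_mul_self n hx0
    calc n < (q + 1) * x := hn_lt
      _ ≤ 2 ^ (L + 1) * x := by nlinarith
      _ = x * 2 ^ (L + 1) := by ring

-- L stays small inside Dom, so inner fuel 64 suffices
lemma pvL_small (n x : Int) (L : Nat) (hx : 1 ≤ x) (hn : n ≤ 2147483648)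
    (hL1 : x * 2 ^ L ≤ n) : L ≤ 31 := by
  by_contra h
  have h32 : 32 ≤ L := by omega
  have : (2:Int) ^ 32 ≤ 2 ^ L := pow_le_pow_right₀ (by norm_num) h32
  have hx2 : (2:Int) ^ L ≤ x * 2 ^ L := by nlinarith
  have : (2:Int) ^ 32 ≤ n := by omega
  norm_num at this; omega

-- the outer loops agree step by step
lemma find23Loop_eq (n : Int) (hn : n ≤ 2147483648) :
    ∀ (f b : Nat) (m : Int), find23Loop n f b m = find23AltLoop n f (3 ^ b) m := by
  intro f
  induction f with
  | zero => intro b m; rfl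
  | succ f ih =>
    intro b m
    have hx : (1:Int) ≤ 3 ^ b := one_le_pow₀ (by norm_num)
    by_cases hlt : n < 3 ^ b
    · simp only [find23Loop, find23AltLoop, hlt, if_true, not_le.mpr hlt, if_false]
    · have hxle : (3:Int) ^ b ≤ n := not_lt.mp hlt
      obtain ⟨hL1, hL2⟩ := pvBracket n (3 ^ b) hx hxle
      have hLs := pvL_small n (3 ^ b)
        (PySem.Int.bitLength (PySem.Int.floordiv n (3 ^ b)) - 1) hx hn hL1
      have hinner := find23Inner_eq n (3 ^ b) _ hx hL1 hL2 64 0 m (Nat.zero_le _) (by omega)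
      simp only [find23Loop, find23AltLoop, hlt, if_false, not_lt.mp hlt, if_true]
      rw [hinner, ih (b + 1)]
      have : (3:Int) ^ b * 3 = 3 ^ (b + 1) := by ring
      rw [this]
      unfold pvUpd
      have : (3:Int) ^ b * 2 ^ (PySem.Int.bitLength (PySem.Int.floordiv n (3 ^ b)) - 1 + 1)
           = 3 ^ b * 2 ^ (PySem.Int.bitLength (PySem.Int.floordiv n (3 ^ b)) - 1) * 2 := by ring
      rw [this]

-- ===== VERDICT (by name: the statement is the Claim_ definition above) =====
theorem find23_spec : Claim_equal_find23 := by
  intro n hdom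
  unfold Dom_find23 pvDomInt at hdom
  simp only [decide_eq_true_eq] at hdom
  show find23 n = find23_alt n
  unfold find23 find23_alt
  by_cases h : n < 10
  · rw [if_pos h, if_pos h]
  · rw [if_neg h, if_neg h]
    have := find23Loop_eq n hdom.2 64 0 1
    simpa using this
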